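-- pv_equiv track=rewrite | github.com/Nicokac/Cartera | src/decision/history.py | _history_match_tickers
-- ===== SOURCE A (Python) =====
-- LIQUIDITY_TEMPORAL_GROUPS = {
--     "operativa_ars": {"CASH_ARS", "CAUCION"},
-- }
--
-- def _history_match_tickers(ticker: object) -> set[str]:
--     normalized = str(ticker or "").strip().upper()
--     if not normalized:
--         return set()
--     for members in LIQUIDITY_TEMPORAL_GROUPS.values():
--         if normalized in members:
--             return set(members)
--     return {normalized}
-- ===== SOURCE B (Python) =====
-- LIQUIDITY_TEMPORAL_GROUPS = {
--     "operativa_ars": {"CASH_ARS", "CAUCION"},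
-- }
--
-- # Reverse index: member ticker -> the full member set of its group.
-- _GROUP_BY_MEMBER = {
--     member: frozenset(members)
--     for members in LIQUIDITY_TEMPORAL_GROUPS.values()
--     for member in members
-- }
--
-- def _history_match_tickers(ticker: object) -> set[str]:
--     normalized = str(ticker or "").strip().upper()
--     if not normalized:
--         return set()
--     return set(_GROUP_BY_MEMBER.get(normalized, (normalized,)))
-- ===== Notes on version B (the rewrite author's own statement) =====
-- stated objective: idiomatic
-- what changed: Replaced the per-call scan over LIQUIDITY_TEMPORAL_GROUPS with a module-level reverse index from member ticker to its group's member set, so the function does one dict lookup instead of looping over groups.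
import Mathlib
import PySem

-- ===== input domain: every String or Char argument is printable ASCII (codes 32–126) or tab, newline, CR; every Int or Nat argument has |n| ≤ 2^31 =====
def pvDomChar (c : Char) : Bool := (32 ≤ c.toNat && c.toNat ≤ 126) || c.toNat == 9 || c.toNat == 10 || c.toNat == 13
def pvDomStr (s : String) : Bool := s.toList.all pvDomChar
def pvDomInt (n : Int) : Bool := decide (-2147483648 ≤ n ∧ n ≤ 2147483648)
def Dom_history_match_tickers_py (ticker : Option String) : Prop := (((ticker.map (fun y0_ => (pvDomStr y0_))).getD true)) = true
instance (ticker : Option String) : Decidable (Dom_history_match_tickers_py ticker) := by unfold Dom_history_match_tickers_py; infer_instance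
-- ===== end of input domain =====

-- B replaces A's per-call scan over the groups with a precomputed reverse index
-- (member ticker -> group member set) looked up once; return value only (fresh set).

-- ===== PORT A =====
-- the values of LIQUIDITY_TEMPORAL_GROUPS (one group; a Python set -> distinct-element list)
def pvGroupsA : List (List String) := [["CASH_ARS", "CAUCION"]]

-- the 'for members in ...: if normalized in members: return set(members)' loop
def pvScanGroups : List (List String) → String → Option (List String)
  | [], _ => none
  | ms :: rest, n => if ms.contains n then some ms else pvScanGroups rest n

def history_match_tickers_py (ticker : Option String) : List String :=
  let normalized := PySem.Str.upper (PySem.Str.strip (ticker.getD ""))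
  if normalized = "" then []
  else
    match pvScanGroups pvGroupsA normalized with
    | some ms => ms
    | none => [normalized]

-- ===== PORT B =====
-- module-level reverse index {member: frozenset(members)} (dict comprehension)
def pvGroupByMember : PySem.Dict String (List String) :=
  PySem.Dict.ofList
    (pvGroupsA.flatMap (fun ms => ms.map (fun m => (m, ms))))

def history_match_tickers_py_alt (ticker : Option String) : List String :=
  let normalized := PySem.Str.upper (PySem.Str.strip (ticker.getD ""))
  if normalized = "" then []
  else PySem.Dict.getD pvGroupByMember normalized [normalized]

-- ===== PRECONDITION & SPEC =====
def Spec_history_match_tickers_py (ticker : Option String) (out : List String) : Prop := out = history_match_tickers_py_alt ticker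
instance (ticker : Option String) (out : List String) : Decidable (Spec_history_match_tickers_py ticker out) := by unfold Spec_history_match_tickers_py; infer_instance

-- ===== CLAIM (what is proved, stated in full; the proofs are below) =====
def Claim_equal_history_match_tickers_py : Prop := ∀ (ticker : Option String), Dom_history_match_tickers_py ticker → Spec_history_match_tickers_py ticker (history_match_tickers_py ticker)

-- ===== LEMMAS AND PROOFS =====

-- both bodies agree as functions of the already-normalized string
theorem pv_body_eq (n : String) :
    (match pvScanGroups pvGroupsA n with
     | some ms => ms
     | none => [n]) =
    PySem.Dict.getD pvGroupByMember n [n] := by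
  by_cases h1 : n = "CASH_ARS"
  · subst h1; decide
  · by_cases h2 : n = "CAUCION"
    · subst h2; decide
    · have hs : pvScanGroups pvGroupsA n = none := by
        simp [pvScanGroups, pvGroupsA, h1, h2]
      have hd : PySem.Dict.getD pvGroupByMember n [n] = [n] := by
        simp [pvGroupByMember, pvGroupsA, PySem.Dict.ofList, PySem.Dict.update,
          PySem.Dict.getD_insert, PySem.Dict.getD_empty, h1, h2]
      rw [hs, hd]

-- ===== VERDICT (by name: the statement is the Claim_ definition above) =====
theorem history_match_tickers_py_spec : Claim_equal_history_match_tickers_py := by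
  intro ticker _
  unfold Spec_history_match_tickers_py history_match_tickers_py history_match_tickers_py_alt
  dsimp only
  generalize PySem.Str.upper (PySem.Str.strip (ticker.getD "")) = n
  by_cases h : n = ""
  · rw [if_pos h, if_pos h]
  · rw [if_neg h, if_neg h]
    exact pv_body_eq n
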